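-- pv_equiv track=rewrite | github.com/melissajblins/ProcessamentoInformacao | ECs/05_Matrizes/EC05.09.py | confere_ordenacao
-- ===== SOURCE A (Python) =====
-- def confere_ordenacao(matriz: int):
--     for i in range(len(matriz)):
--         for j in range(len(matriz[0])):
--             for k in range(j + 1, len(matriz[0]), + 1):
--                 if (matriz[i][j] > matriz[i][k]):
--                     resultado = testa_vetor(matriz[i], len(matriz[0]), 1)
--                     if (resultado == False):
--                         return resultado
--                 else:
--                     resultado = testa_vetor(matriz[i], len(matriz[0]), 0)
--                     if (resultado == False):
--                         return resultado
--     return True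
--
-- def testa_vetor(vetor: [int], tamanho: int, operacao: int) -> bool:
--     if (operacao == 0):
--         for k in range(tamanho):
--             for l in range(k + 1, tamanho, + 1):
--                 if vetor[k] > vetor[l]:
--                     return False
--     else:
--         for k in range(tamanho):
--             for l in range(k + 1, tamanho, + 1):
--                 if vetor[k] < vetor[l]:
--                     return False
--     return True
-- ===== SOURCE B (Python) =====
-- def confere_ordenacao(matriz):
--     if not matriz:
--         return True
--     m = len(matriz[0])
--     for row in matriz:
--         r = row[:m]
--         nondec = all(x <= y for x, y in zip(r, r[1:]))
--         strdec = all(x > y for x, y in zip(r, r[1:]))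
--         if not (nondec or strdec):
--             return False
--     return True
-- ===== Notes on version B (the rewrite author's own statement) =====
-- stated objective: faster
-- what changed: Replaced A's per-row scan of all index pairs that re-runs a full quadratic testa_vetor check for every pair with one linear adjacent-pair pass per row (row ok iff adjacently non-decreasing or adjacently strictly decreasing, using the first row's width as A does).
-- outside the precondition, e.g. on confere_ordenacao([[2, 1, 2], [5]]): A returns False, B returns False
import Mathlib
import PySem

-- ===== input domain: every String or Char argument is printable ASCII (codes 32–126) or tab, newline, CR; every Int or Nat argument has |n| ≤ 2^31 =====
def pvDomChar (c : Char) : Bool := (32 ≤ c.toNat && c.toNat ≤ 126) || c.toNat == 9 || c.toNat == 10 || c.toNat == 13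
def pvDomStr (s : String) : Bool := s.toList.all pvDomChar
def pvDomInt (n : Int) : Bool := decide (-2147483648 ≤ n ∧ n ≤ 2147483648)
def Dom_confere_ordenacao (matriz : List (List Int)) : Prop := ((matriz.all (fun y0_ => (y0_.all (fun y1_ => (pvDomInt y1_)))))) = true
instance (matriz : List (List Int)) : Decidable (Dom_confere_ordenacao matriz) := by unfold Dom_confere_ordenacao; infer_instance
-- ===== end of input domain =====

-- B replaces A's all-pairs scan (which re-runs a quadratic whole-row check per pair)
-- with one linear adjacent-pair pass per row; equal return values on Pre_ (rectangular-enough input).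
-- ===== PORT A =====
-- early `return False` is encoded by `.all` short-circuit (same Bool value);
-- `pyGetD _ _ 0` / `pyGetD _ _ []` = Python indexing, default unreachable inside Pre_
def testa_vetor (vetor : List Int) (tamanho : Int) (operacao : Int) : Bool :=
  if operacao == 0 then
    (PySem.List.pyRange 0 tamanho 1).all fun k =>
      (PySem.List.pyRange (k+1) tamanho 1).all fun l =>
        !(PySem.List.pyGetD vetor k 0 > PySem.List.pyGetD vetor l 0)
  else
    (PySem.List.pyRange 0 tamanho 1).all fun k =>
      (PySem.List.pyRange (k+1) tamanho 1).all fun l =>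
        !(PySem.List.pyGetD vetor k 0 < PySem.List.pyGetD vetor l 0)

def confere_ordenacao (matriz : List (List Int)) : Bool :=
  (PySem.List.pyRange 0 (matriz.length : Int) 1).all fun i =>
    let linha := PySem.List.pyGetD matriz i []
    let m : Int := (PySem.List.pyGetD matriz 0 []).length
    (PySem.List.pyRange 0 m 1).all fun j =>
      (PySem.List.pyRange (j+1) m 1).all fun k =>
        if PySem.List.pyGetD linha j 0 > PySem.List.pyGetD linha k 0 then
          testa_vetor linha m 1
        else
          testa_vetor linha m 0

-- ===== PORT B =====
-- zip r (r.drop 1) = Python's zip(r, r[1:]); row[:m] = row.take m (m = first row's width, as Source B)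
def rowOk (r : List Int) : Bool :=
  ((r.zip (r.drop 1)).all fun p => p.1 ≤ p.2) || ((r.zip (r.drop 1)).all fun p => p.1 > p.2)

def confere_ordenacao_alt (matriz : List (List Int)) : Bool :=
  match matriz with
  | [] => true
  | r0 :: _ =>
    let m := r0.length
    matriz.all fun row => rowOk (row.take m)

-- ===== PRECONDITION & SPEC =====
-- Pre_ excludes ragged matrices having a row shorter than the first row: there A indexes
-- past a row's end and (except when an earlier violation already returned False) raises IndexError.
def Pre_confere_ordenacao (matriz : List (List Int)) : Prop :=
  ∀ row ∈ matriz, (matriz.headD []).length ≤ row.length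
instance (matriz : List (List Int)) : Decidable (Pre_confere_ordenacao matriz) := by
  unfold Pre_confere_ordenacao; infer_instance
def pvWitness_confere_ordenacao : List (List Int) := [[1, 2], [3, 3]]
def Spec_confere_ordenacao (matriz : List (List Int)) (out : Bool) : Prop := out = confere_ordenacao_alt matriz
instance (matriz : List (List Int)) (out : Bool) : Decidable (Spec_confere_ordenacao matriz out) := by unfold Spec_confere_ordenacao; infer_instance

-- ===== CLAIM (what is proved, stated in full; the proofs are below) =====
def Claim_equal_confere_ordenacao : Prop := ∀ (matriz : List (List Int)), Dom_confere_ordenacao matriz → Pre_confere_ordenacao matriz → Spec_confere_ordenacao matriz (confere_ordenacao matriz)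

-- ===== LEMMAS AND PROOFS =====

lemma zipall_eq_chain (q : Int → Int → Bool) : ∀ r : List Int,
    (((r.zip (r.drop 1)).all fun p => q p.1 p.2) = true ↔ List.IsChain (fun x y => q x y = true) r)
  | [] => by simp
  | [x] => by simp
  | x :: y :: t => by
      simpa [List.isChain_cons_cons] using
        (and_congr Iff.rfl (zipall_eq_chain q (y :: t)))

lemma pairAll_iff (row : List Int) (m : Nat) (hm : m ≤ row.length) (P : Int → Int → Bool) :
    (((PySem.List.pyRange 0 (m:Int) 1).all fun j => (PySem.List.pyRange (j+1) (m:Int) 1).all fun k =>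
        P (PySem.List.pyGetD row j 0) (PySem.List.pyGetD row k 0)) = true)
    ↔ (row.take m).Pairwise (fun x y => P x y = true) := by
  rw [List.pairwise_iff_getElem]
  simp only [List.all_eq_true, PySem.List.mem_pyRange_one, List.length_take]
  constructor
  · intro h i j hi hj hij
    have hi' : i < m := by omega
    have hj' : j < m := by omega
    have := h (i : Int) ⟨by omega, by exact_mod_cast hi'⟩ (j : Int) ⟨by omega, by exact_mod_cast hj'⟩
    rw [PySem.List.pyGetD_eq_getElem row 0 (by omega) (by omega),
        PySem.List.pyGetD_eq_getElem row 0 (by omega) (by omega)] at this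
    simpa [List.getElem_take] using this
  · intro h j ⟨hj0, hjm⟩ k ⟨hkj, hkm⟩
    have hj' : j.toNat < m := by omega
    have hk' : k.toNat < m := by omega
    have := h j.toNat k.toNat (by omega) (by omega) (by omega)
    rw [PySem.List.pyGetD_eq_getElem row 0 hj0 (by omega),
        PySem.List.pyGetD_eq_getElem row 0 (by omega) (by omega)]
    simpa [List.getElem_take] using this

lemma testa0_iff (row : List Int) (m : Nat) (hm : m ≤ row.length) :
    testa_vetor row (m:Int) 0 = true ↔ (row.take m).Pairwise (fun x y : Int => x ≤ y) := by
  unfold testa_vetor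
  rw [if_pos (by decide), pairAll_iff row m hm (fun x y => !(x > y))]
  constructor <;> exact fun h => h.imp (fun hb => by simpa using hb)

lemma testa1_iff (row : List Int) (m : Nat) (hm : m ≤ row.length) :
    testa_vetor row (m:Int) 1 = true ↔ (row.take m).Pairwise (fun x y : Int => x ≥ y) := by
  unfold testa_vetor
  rw [if_neg (by decide), pairAll_iff row m hm (fun x y => !(x < y))]
  constructor <;> exact fun h => h.imp (fun hb => by simpa using hb)

lemma rowkey (r : List Int) (T1 T0 : Bool)
    (h1 : T1 = true ↔ r.Pairwise (fun x y : Int => x ≥ y))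
    (h0 : T0 = true ↔ r.Pairwise (fun x y : Int => x ≤ y)) :
    (r.Pairwise (fun x y => (if x > y then T1 else T0) = true)) ↔
      (r.Pairwise (fun x y : Int => x ≤ y) ∨ r.Pairwise (fun x y : Int => x > y)) := by
  constructor
  · intro H
    by_cases hD : r.Pairwise (fun x y : Int => x ≤ y)
    · exact Or.inl hD
    · right
      obtain ⟨i, j, hi, hj, hij, hgt⟩ := by
        rw [List.pairwise_iff_getElem] at hD; push Not at hD
        exact hD
      have hN : r.Pairwise (fun x y : Int => x ≥ y) := by
        have := (List.pairwise_iff_getElem.mp H) i j hi hj hij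
        rw [if_pos (by omega)] at this
        exact h1.mp this
      rw [List.pairwise_iff_getElem]
      intro a b ha hb hab
      have hge := (List.pairwise_iff_getElem.mp hN) a b ha hb hab
      by_contra hle
      have := (List.pairwise_iff_getElem.mp H) a b ha hb hab
      rw [if_neg (by omega)] at this
      have hP := (List.pairwise_iff_getElem.mp (h0.mp this)) i j hi hj hij
      omega
  · rintro (hD | hS)
    · exact hD.imp (fun hxy => by rw [if_neg (by omega)]; exact h0.mpr hD)
    · have hN : r.Pairwise (fun x y : Int => x ≥ y) := hS.imp (fun h => le_of_lt h)
      exact hS.imp (fun hxy => by rw [if_pos hxy]; exact h1.mpr hN)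

lemma rowOk_iff (r : List Int) :
    rowOk r = true ↔ (r.Pairwise (fun x y : Int => x ≤ y) ∨ r.Pairwise (fun x y : Int => x > y)) := by
  unfold rowOk
  rw [Bool.or_eq_true, zipall_eq_chain (fun x y => decide (x ≤ y)) r, zipall_eq_chain (fun x y => decide (x > y)) r]
  have e1 : (fun x y : Int => (decide (x ≤ y)) = true) = (fun x y : Int => x ≤ y) := by
    funext x y; simp
  have e2 : (fun x y : Int => (decide (x > y)) = true) = (fun x y : Int => x > y) := by
    funext x y; simp
  rw [e1, e2, List.isChain_iff_pairwise, @List.isChain_iff_pairwise _ _ _ instTransGT]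

lemma all_congr_mem {α : Type} (l : List α) (p q : α → Bool)
    (h : ∀ x ∈ l, p x = q x) : l.all p = l.all q := by
  induction l with
  | nil => rfl
  | cons a t ih =>
    simp only [List.all_cons]
    rw [h a (by simp), ih (fun x hx => h x (by simp [hx]))]

lemma all_pyRange_getD {α : Type} (xs : List α) (d : α) (g : α → Bool) :
    ((PySem.List.pyRange 0 (xs.length : Int) 1).all fun i => g (PySem.List.pyGetD xs i d)) = xs.all g := by
  conv_rhs => rw [← PySem.List.map_pyGetD_pyRange_zero' xs d]
  rw [List.all_map]
  rfl

theorem confere_ordenacao_spec : Claim_equal_confere_ordenacao := by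
  intro matriz _hdom hpre
  unfold Spec_confere_ordenacao
  unfold Pre_confere_ordenacao at hpre
  match matriz with
  | [] => rfl
  | r0 :: rest =>
    unfold confere_ordenacao confere_ordenacao_alt
    simp only []
    rw [show PySem.List.pyGetD (r0 :: rest) 0 [] = r0 from by
      simp [PySem.List.pyGetD, PySem.List.pyGet?, PySem.List.pyIdx?]]
    rw [all_pyRange_getD (r0 :: rest) [] (fun linha =>
      (PySem.List.pyRange 0 (r0.length : Int) 1).all fun j =>
        (PySem.List.pyRange (j+1) (r0.length : Int) 1).all fun k =>
          if PySem.List.pyGetD linha j 0 > PySem.List.pyGetD linha k 0 then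
            testa_vetor linha (r0.length : Int) 1
          else
            testa_vetor linha (r0.length : Int) 0)]
    refine all_congr_mem _ _ _ (fun row hmem => ?_)
    have hm : r0.length ≤ row.length := hpre row hmem
    rw [Bool.eq_iff_iff]
    rw [pairAll_iff row r0.length hm
        (fun x y => if x > y then testa_vetor row r0.length 1 else testa_vetor row r0.length 0)]
    rw [rowOk_iff]
    exact rowkey _ _ _ (testa1_iff row r0.length hm) (testa0_iff row r0.length hm)
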